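-- pv_equiv track=rewrite | github.com/Pckk-solvers/Water-Info-Acquirer | src/hydrology_graphs/ui/view_models.py | selected_station_pairs
-- ===== SOURCE A (Python) =====
-- def selected_station_pairs(
--     catalog_stations: list[tuple[str, str, str]],
--     selected_indices: list[int],
-- ) -> list[tuple[str, str]]:
--     """Listbox 選択位置から重複なし station_pairs を作る。"""
--
--     pairs: list[tuple[str, str]] = []
--     seen: set[tuple[str, str]] = set()
--     for idx in selected_indices:
--         source, station_key, _name = catalog_stations[int(idx)]
--         pair = (source, station_key)
--         if pair in seen:
--             continue
--         seen.add(pair)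
--         pairs.append(pair)
--     return pairs
-- ===== SOURCE B (Python) =====
-- def selected_station_pairs(
--     catalog_stations: list[tuple[str, str, str]],
--     selected_indices: list[int],
-- ) -> list[tuple[str, str]]:
--     pairs = [
--         (catalog_stations[int(idx)][0], catalog_stations[int(idx)][1])
--         for idx in selected_indices
--     ]
--
--     def dedup(xs: list[tuple[str, str]]) -> list[tuple[str, str]]:
--         if not xs:
--             return []
--         head = xs[0]
--         return [head] + [p for p in dedup(xs[1:]) if p != head]
--
--     return dedup(pairs)
-- ===== Notes on version B (the rewrite author's own statement) =====
-- stated objective: alternative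
-- what changed: Replaces A's single-pass loop with a seen-set accumulator by a two-stage computation: map the indices to pairs, then deduplicate by structural recursion that filters each head's later duplicates out of the recursively deduplicated tail (no seen set, no accumulator).
import Mathlib
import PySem

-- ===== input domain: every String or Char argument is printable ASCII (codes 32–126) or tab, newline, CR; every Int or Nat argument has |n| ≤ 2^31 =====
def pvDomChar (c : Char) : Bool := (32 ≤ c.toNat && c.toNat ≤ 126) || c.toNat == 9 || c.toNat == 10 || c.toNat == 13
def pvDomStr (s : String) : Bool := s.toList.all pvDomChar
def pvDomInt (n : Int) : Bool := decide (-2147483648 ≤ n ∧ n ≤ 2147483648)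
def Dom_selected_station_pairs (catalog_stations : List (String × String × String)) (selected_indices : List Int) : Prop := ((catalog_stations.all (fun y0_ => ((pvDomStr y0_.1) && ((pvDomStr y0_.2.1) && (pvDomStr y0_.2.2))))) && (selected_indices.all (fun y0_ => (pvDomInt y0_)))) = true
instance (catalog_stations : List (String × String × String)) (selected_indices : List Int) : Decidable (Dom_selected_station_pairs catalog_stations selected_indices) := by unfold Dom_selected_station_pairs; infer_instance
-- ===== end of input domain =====

-- B replaces A's seen-set loop by map-then-recursive-dedup (filter the tail's dedup); alternative decomposition, return value only.


-- ===== PORT A =====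
-- loop state: (pairs, seen); pyGetD is exact under Pre_ (index in range)
def selected_station_pairs (catalog_stations : List (String × String × String)) (selected_indices : List Int) : List (String × String) :=
  (selected_indices.foldl
    (fun st idx =>
      let t := PySem.List.pyGetD catalog_stations idx ("", "", "")
      let pair := (t.1, t.2.1)
      if PySem.Set.contains st.2 pair then st
      else (st.1 ++ [pair], PySem.Set.add st.2 pair))
    (([] : List (String × String)), (PySem.Set.empty : PySem.Set (String × String)))).1

-- ===== PORT B =====
-- Source B's inner dedup: [head] + [p for p in dedup(rest) if p != head]
def pvDedupB : List (String × String) → List (String × String)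
  | [] => []
  | head :: rest => head :: (pvDedupB rest).filter (fun p => p != head)

def selected_station_pairs_alt (catalog_stations : List (String × String × String)) (selected_indices : List Int) : List (String × String) :=
  pvDedupB
    (selected_indices.map (fun idx =>
      let t := PySem.List.pyGetD catalog_stations idx ("", "", "")
      (t.1, t.2.1)))

-- ===== PRECONDITION & SPEC =====
-- Pre_ excludes exactly the inputs where catalog_stations[int(idx)] raises IndexError in A (and in B).
def Pre_selected_station_pairs (catalog_stations : List (String × String × String)) (selected_indices : List Int) : Prop :=
  ∀ idx ∈ selected_indices, PySem.Raise.InRange catalog_stations.length idx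
instance (catalog_stations : List (String × String × String)) (selected_indices : List Int) : Decidable (Pre_selected_station_pairs catalog_stations selected_indices) := by unfold Pre_selected_station_pairs; infer_instance
def pvWitness_selected_station_pairs : (List (String × String × String)) × List Int :=
  ([("a", "b", "c"), ("x", "y", "z")], [0, 1, -1, 0])

def Spec_selected_station_pairs (catalog_stations : List (String × String × String)) (selected_indices : List Int) (out : List (String × String)) : Prop := out = selected_station_pairs_alt catalog_stations selected_indices
instance (catalog_stations : List (String × String × String)) (selected_indices : List Int) (out : List (String × String)) : Decidable (Spec_selected_station_pairs catalog_stations selected_indices out) := by unfold Spec_selected_station_pairs; infer_instance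

-- ===== CLAIM (what is proved, stated in full; the proofs are below) =====
def Claim_equal_selected_station_pairs : Prop := ∀ (catalog_stations : List (String × String × String)) (selected_indices : List Int), Dom_selected_station_pairs catalog_stations selected_indices → Pre_selected_station_pairs catalog_stations selected_indices → Spec_selected_station_pairs catalog_stations selected_indices (selected_station_pairs catalog_stations selected_indices)

-- ===== LEMMAS AND PROOFS =====

-- A's loop keeps pairs = seen; starting from (s, s) it computes Set.add-folding on both sides.
theorem pv_loop_eq {α : Type} [BEq α] (f : Int → α) (l : List Int) (s : List α) :
    l.foldl
      (fun (st : List α × PySem.Set α) idx =>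
        let pair := f idx
        if PySem.Set.contains st.2 pair then st
        else (st.1 ++ [pair], PySem.Set.add st.2 pair))
      (s, s)
    = ((l.map f).foldl PySem.Set.add s, (l.map f).foldl PySem.Set.add s) := by
  induction l generalizing s with
  | nil => rfl
  | cons x xs ih =>
    simp only [List.foldl_cons, List.map_cons]
    by_cases h : PySem.Set.contains s (f x) = true
    · have hadd : PySem.Set.add s (f x) = s := by
        simp only [PySem.Set.add]; rw [if_pos h]
      rw [if_pos h, hadd]
      exact ih s
    · rw [if_neg h]
      have hadd : PySem.Set.add s (f x) = s ++ [f x] := by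
        simp only [PySem.Set.add]; rw [if_neg h]
      rw [hadd]
      exact ih (s ++ [f x])

-- generic form of pvDedupB for the invariant proof
def pvDedupG {α : Type} [BEq α] : List α → List α
  | [] => []
  | head :: rest => head :: (pvDedupG rest).filter (fun p => p != head)

theorem pvDedupG_eq_B (l : List (String × String)) : pvDedupB l = pvDedupG l := by
  induction l with
  | nil => rfl
  | cons x xs ih => simp [pvDedupB, pvDedupG, ih]

-- seen-set folding from context s = recursive dedup filtered by "not already in s"
theorem pv_fold_eq_dedup {α : Type} [BEq α] [LawfulBEq α] (l : List α) (s : List α) :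
    l.foldl PySem.Set.add s = s ++ (pvDedupG l).filter (fun x => !(s.contains x)) := by
  induction l generalizing s with
  | nil => simp [pvDedupG]
  | cons x xs ih =>
    simp only [List.foldl_cons, pvDedupG]
    by_cases h : s.contains x = true
    · have hadd : PySem.Set.add s x = s := by
        simp only [PySem.Set.add, PySem.Set.contains]; rw [if_pos h]
      rw [hadd, ih]
      congr 1
      rw [List.filter_cons]
      have hx : (!s.contains x) = false := by rw [h]; rfl
      rw [hx]
      simp only [Bool.false_eq_true, if_false, List.filter_filter]
      apply List.filter_congr
      intro y _
      by_cases hyx : y = x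
      · subst hyx
        have hy : y ∈ s := by simpa using h
        simp [hy]
      · have : (y != x) = true := by simp [bne, hyx]
        simp [this]
    · have hadd : PySem.Set.add s x = s ++ [x] := by
        simp only [PySem.Set.add, PySem.Set.contains]; rw [if_neg h]
      rw [hadd, ih]
      rw [List.filter_cons]
      have hx : (!s.contains x) = true := by simp_all
      rw [hx]
      simp only [if_true, List.append_assoc, List.singleton_append]
      congr 2
      rw [List.filter_filter]
      apply List.filter_congr
      intro y _
      by_cases hyx : y = x
      · subst hyx; simp
      · have h1 : (y != x) = true := by simp [bne, hyx]
        simp only [h1, List.contains_append]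
        simp [hyx]

-- ===== VERDICT (by name: the statement is the Claim_ definition above) =====
theorem selected_station_pairs_spec : Claim_equal_selected_station_pairs := by
  intro cs sel _ _
  unfold Spec_selected_station_pairs selected_station_pairs selected_station_pairs_alt
  rw [pvDedupG_eq_B]
  have := pv_loop_eq (fun idx => ((PySem.List.pyGetD cs idx ("", "", "")).1, (PySem.List.pyGetD cs idx ("", "", "")).2.1)) sel []
  simp only [PySem.Set.empty] at *
  rw [this]
  simp only [pv_fold_eq_dedup, List.nil_append]
  simp
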